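-- pv_equiv track=rewrite | github.com/xwxthu/cuda-code-skill | nvidia_doc_sync/scrape_cuda_docs.py | _clean_navigation_markdown
-- ===== SOURCE A (Python) =====
-- def _clean_navigation_markdown(markdown: str) -> str:
--     """Remove navigation cruft from markdown."""
--     lines = markdown.split("\n")
--     cleaned_lines = []
--     in_nav = False
--     found_header = False
--
--     for line in lines:
--         if (
--             "NVIDIA" in line
--             and "Toolkit Documentation" in line
--             and not found_header
--         ):
--             in_nav = True
--             continue
--
--         if line.startswith("###") or (
--             line.startswith("##") and "Public Members" in line
--         ):
--             in_nav = False
--             found_header = True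
--
--         if not in_nav:
--             cleaned_lines.append(line)
--
--     return "\n".join(cleaned_lines)
-- ===== SOURCE B (Python) =====
-- def _is_nav(line):
--     return "NVIDIA" in line and "Toolkit Documentation" in line
--
--
-- def _is_header(line):
--     return line.startswith("###") or (
--         line.startswith("##") and "Public Members" in line
--     )
--
--
-- def _clean_navigation_markdown(markdown: str) -> str:
--     """Remove navigation cruft from markdown (index-based, no state machine)."""
--     lines = markdown.split("\n")
--     # first header line that is not itself a nav line (end of the nav block)
--     h = next(
--         (i for i, l in enumerate(lines) if _is_header(l) and not _is_nav(l)),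
--         len(lines),
--     )
--     # first nav line before the header (start of the nav block); h = no nav block
--     n = next((i for i in range(h) if _is_nav(lines[i])), h)
--     return "\n".join(lines[:n] + lines[h:])
-- ===== Notes on version B (the rewrite author's own statement) =====
-- stated objective: simpler
-- what changed: Replaces A's single pass with two mutating flags (in_nav, found_header) by directly computing the two cut indices -- the first header line that is not itself a nav line, and the first nav line before it -- and splicing the line list around that span.
import Mathlib
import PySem

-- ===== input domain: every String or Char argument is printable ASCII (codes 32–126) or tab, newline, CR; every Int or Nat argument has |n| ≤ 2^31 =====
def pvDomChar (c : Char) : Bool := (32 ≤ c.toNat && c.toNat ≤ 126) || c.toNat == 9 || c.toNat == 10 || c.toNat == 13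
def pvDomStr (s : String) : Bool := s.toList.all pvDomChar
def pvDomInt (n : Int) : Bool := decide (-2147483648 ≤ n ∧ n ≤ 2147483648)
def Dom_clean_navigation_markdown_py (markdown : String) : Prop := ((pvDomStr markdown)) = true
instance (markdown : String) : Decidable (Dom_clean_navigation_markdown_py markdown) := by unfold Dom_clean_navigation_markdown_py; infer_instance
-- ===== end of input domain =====

-- B replaces A's stateful line-by-line flag machine by directly computing the two
-- cut indices (first real header, first nav line before it) and splicing the list
-- of lines; objective: simpler (same cost, no state machine).


-- the two line tests, shared verbatim by both ports (nav line; header line)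
def is_nav_py (l : List Char) : Bool :=
  PySem.Chars.isIn "NVIDIA".toList l && PySem.Chars.isIn "Toolkit Documentation".toList l

def is_header_py (l : List Char) : Bool :=
  PySem.Chars.startswith l "###".toList
    || (PySem.Chars.startswith l "##".toList && PySem.Chars.isIn "Public Members".toList l)

-- ===== PORT A =====
-- the 'for line in lines' loop with its two flags (in_nav, found_header);
-- the appended lines are returned instead of accumulated
def loopA : List (List Char) → Bool → Bool → List (List Char)
  | [], _, _ => []
  | l :: rest, in_nav, found =>
    if is_nav_py l && !found then
      loopA rest true found
    else
      let p : Bool × Bool := if is_header_py l then (false, true) else (in_nav, found)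
      if p.1 then loopA rest p.1 p.2 else l :: loopA rest p.1 p.2

def clean_navigation_markdown_py (markdown : String) : String :=
  let lines := (PySem.Chars.split? markdown.toList ['\n']).getD []
  String.ofList (PySem.Chars.join ['\n'] (loopA lines false false))

-- ===== PORT B =====
def clean_navigation_markdown_py_alt (markdown : String) : String :=
  let lines := (PySem.Chars.split? markdown.toList ['\n']).getD []
  -- next((i for i, l in enumerate(lines) if _is_header(l) and not _is_nav(l)), len(lines))
  let h := (lines.findIdx? (fun l => is_header_py l && !is_nav_py l)).getD lines.length
  -- next((i for i in range(h) if _is_nav(lines[i])), h)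
  let n := ((lines.take h).findIdx? (fun l => is_nav_py l)).getD h
  String.ofList (PySem.Chars.join ['\n'] (lines.take n ++ lines.drop h))

-- ===== PRECONDITION & SPEC =====
def Spec_clean_navigation_markdown_py (markdown : String) (out : String) : Prop := out = clean_navigation_markdown_py_alt markdown
instance (markdown : String) (out : String) : Decidable (Spec_clean_navigation_markdown_py markdown out) := by unfold Spec_clean_navigation_markdown_py; infer_instance

-- ===== CLAIM (what is proved, stated in full; the proofs are below) =====
def Claim_equal_clean_navigation_markdown_py : Prop := ∀ (markdown : String), Dom_clean_navigation_markdown_py markdown → Spec_clean_navigation_markdown_py markdown (clean_navigation_markdown_py markdown)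

-- ===== LEMMAS AND PROOFS =====

theorem getD_map_succ (o : Option Nat) (d : Nat) :
    (o.map (· + 1)).getD (d + 1) = o.getD d + 1 := by
  cases o <;> rfl

-- phase after found_header: everything is kept
theorem loopA_found (lines : List (List Char)) : loopA lines false true = lines := by
  induction lines with
  | nil => rfl
  | cons l rest ih =>
    unfold loopA
    simp only [Bool.not_true, Bool.and_false, Bool.false_eq_true, if_false]
    split <;> simp [ih]

-- phase inside the nav block: drop until the first real header line
theorem loopA_nav (lines : List (List Char)) :
    loopA lines true false =
      lines.drop ((lines.findIdx? (fun l => is_header_py l && !is_nav_py l)).getD lines.length) := by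
  induction lines with
  | nil => rfl
  | cons l rest ih =>
    by_cases hn : is_nav_py l = true
    · have hk : (is_header_py l && !is_nav_py l) = false := by simp [hn]
      have hA : loopA (l :: rest) true false = loopA rest true false := by
        simp [loopA, hn]
      rw [hA, ih, List.findIdx?_cons]
      simp [hk]
    · by_cases hh : is_header_py l = true
      · have hk : (is_header_py l && !is_nav_py l) = true := by simp [hh, hn]
        have hA : loopA (l :: rest) true false = l :: rest := by
          simp [loopA, hn, hh, loopA_found]
        rw [hA, List.findIdx?_cons]
        simp [hk]
      · have hk : (is_header_py l && !is_nav_py l) = false := by simp [hh]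
        have hA : loopA (l :: rest) true false = loopA rest true false := by
          simp [loopA, hn, hh]
        rw [hA, ih, List.findIdx?_cons]
        simp [hk]

-- the whole loop: keep lines before the first nav line, then everything from the first real header on
theorem loopA_main (lines : List (List Char)) :
    loopA lines false false =
      lines.take (((lines.take ((lines.findIdx? (fun l => is_header_py l && !is_nav_py l)).getD lines.length)).findIdx?
            (fun l => is_nav_py l)).getD ((lines.findIdx? (fun l => is_header_py l && !is_nav_py l)).getD lines.length))
        ++ lines.drop ((lines.findIdx? (fun l => is_header_py l && !is_nav_py l)).getD lines.length) := by
  induction lines with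
  | nil => rfl
  | cons l rest ih =>
    by_cases hn : is_nav_py l = true
    · have hn' : is_nav_py l = true := hn
      have hk : (is_header_py l && !is_nav_py l) = false := by simp [hn]
      have hA : loopA (l :: rest) false false = loopA rest true false := by
        simp [loopA, hn]
      have hH : ((l :: rest).findIdx? (fun l => is_header_py l && !is_nav_py l)).getD (l :: rest).length
          = ((rest.findIdx? (fun l => is_header_py l && !is_nav_py l)).getD rest.length) + 1 := by
        rw [List.findIdx?_cons]
        simp only [hk, Bool.false_eq_true, if_false, List.length_cons, getD_map_succ]
      rw [hA, loopA_nav, hH, List.take_succ_cons, List.drop_succ_cons, List.findIdx?_cons]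
      simp only [hn', if_true, Option.getD_some, List.take_zero, List.nil_append]
    · by_cases hh : is_header_py l = true
      · have hk : (is_header_py l && !is_nav_py l) = true := by simp [hh, hn]
        have hA : loopA (l :: rest) false false = l :: rest := by
          simp [loopA, hn, hh, loopA_found]
        rw [hA, List.findIdx?_cons]
        simp [hk]
      · have hn' : is_nav_py l = false := by simpa using hn
        have hk : (is_header_py l && !is_nav_py l) = false := by simp [hh]
        have hA : loopA (l :: rest) false false = l :: loopA rest false false := by
          simp [loopA, hn, hh]
        have hH : ((l :: rest).findIdx? (fun l => is_header_py l && !is_nav_py l)).getD (l :: rest).length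
            = ((rest.findIdx? (fun l => is_header_py l && !is_nav_py l)).getD rest.length) + 1 := by
          rw [List.findIdx?_cons]
          simp only [hk, Bool.false_eq_true, if_false, List.length_cons, getD_map_succ]
        rw [hA, ih, hH, List.take_succ_cons, List.drop_succ_cons, List.findIdx?_cons]
        simp only [hn', Bool.false_eq_true, if_false, getD_map_succ, List.take_succ_cons,
          List.cons_append]

-- ===== VERDICT (by name: the statement is the Claim_ definition above) =====
theorem clean_navigation_markdown_py_spec : Claim_equal_clean_navigation_markdown_py := by
  intro markdown _
  unfold Spec_clean_navigation_markdown_py clean_navigation_markdown_py clean_navigation_markdown_py_alt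
  simp only [loopA_main]
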